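-- pv_equiv track=rewrite | github.com/myutman/myutman.github.io | src/algorithm/cave_gen.py | check
-- ===== SOURCE A (Python) =====
-- d1is = [0, 1, 1, 1, 0, -1, -1, -1]
--
-- d1js = [1, 1, 0, -1, -1, -1, 0, 1]
--
-- def check(cave, i, j):
--     neighbours = []
--     for di, dj in zip(d1is, d1js):
--         neighbours.append(cave[i + di][j + dj])
--
--     was_occupied = False
--     cnt_empty_before_first = 0
--     cnt_empty = 0
--     cnt_empty_in_between = 0
--     cnt_in_between = 0
--     for neighbour in neighbours:
--         if neighbour == '.':
--             if not was_occupied: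
--                 cnt_empty_before_first += 1
--             else:
--                 cnt_empty += 1
--         else:
--             was_occupied = True
--             cnt_empty_in_between += cnt_empty
--             if cnt_empty >= 1:
--                 cnt_in_between += 1
--             cnt_empty = 0
--
--     return ((cnt_empty + cnt_empty_before_first == 0) or (cnt_empty_in_between == 0)) and (cnt_in_between <= 1)
-- ===== SOURCE B (Python) =====
-- d1is = [0, 1, 1, 1, 0, -1, -1, -1]
--
-- d1js = [1, 1, 0, -1, -1, -1, 0, 1]
--
-- def check(cave, i, j):
--     nb = [cave[i + di][j + dj] for di, dj in zip(d1is, d1js)]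
--     runs = sum(1 for k in range(8) if nb[k] == '.' and nb[k - 1] != '.')
--     return runs <= 1
-- ===== Notes on version B (the rewrite author's own statement) =====
-- stated objective: simpler
-- what changed: Replaces A's 5-counter state machine (was_occupied, empties before/after/between occupied cells) by a direct circular run count: the ring is connected iff it has at most one maximal arc of '.' cells, counted as indices k with nb[k]=='.' and nb[k-1]!='.' (nb[-1] wraps).
import Mathlib
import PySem

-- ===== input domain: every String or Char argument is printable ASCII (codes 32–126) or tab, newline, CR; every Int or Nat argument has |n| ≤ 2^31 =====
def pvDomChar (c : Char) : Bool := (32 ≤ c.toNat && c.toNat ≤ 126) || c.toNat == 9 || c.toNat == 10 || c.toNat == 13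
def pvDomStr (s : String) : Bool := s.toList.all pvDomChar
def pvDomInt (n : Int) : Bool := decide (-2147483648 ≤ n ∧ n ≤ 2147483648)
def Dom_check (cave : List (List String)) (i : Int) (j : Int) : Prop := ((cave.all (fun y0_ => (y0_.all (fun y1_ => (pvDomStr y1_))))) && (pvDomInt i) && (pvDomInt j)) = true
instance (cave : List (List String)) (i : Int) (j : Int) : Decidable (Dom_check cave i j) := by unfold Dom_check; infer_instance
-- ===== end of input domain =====

-- B replaces A's 5-counter state machine by a circular run count (at most one maximal '.' arc); simpler, same cost.


def d1is : List Int := [0, 1, 1, 1, 0, -1, -1, -1]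
def d1js : List Int := [1, 1, 0, -1, -1, -1, 0, 1]

-- one grid access cave[i+di][j+dj] (none = IndexError)
def cellAt (cave : List (List String)) (i j : Int) (p : Int × Int) : Option String :=
  (PySem.List.pyGet? cave (i + p.1)).bind (fun row => PySem.List.pyGet? row (j + p.2))

-- ===== PORT A =====
-- A's first loop: neighbours = []; for di, dj in zip(d1is, d1js): neighbours.append(cave[i+di][j+dj])
def checkNeighbours (cave : List (List String)) (i j : Int) : Option (List String) :=
  (d1is.zip d1js).foldl
    (fun acc p => acc.bind (fun ns => (cellAt cave i j p).map (fun v => ns ++ [v])))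
    (some [])

def check (cave : List (List String)) (i : Int) (j : Int) : Bool :=
  match checkNeighbours cave i j with
  | none => false   -- IndexError; excluded by Pre_check
  | some neighbours =>
    -- state: (was_occupied, cnt_empty_before_first, cnt_empty, cnt_empty_in_between, cnt_in_between)
    let st := neighbours.foldl
      (fun (s : Bool × Int × Int × Int × Int) neighbour =>
        if neighbour == "." then
          if !s.1 then (s.1, s.2.1 + 1, s.2.2.1, s.2.2.2.1, s.2.2.2.2)
          else (s.1, s.2.1, s.2.2.1 + 1, s.2.2.2.1, s.2.2.2.2)
        else
          (true, s.2.1, 0, s.2.2.2.1 + s.2.2.1,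
            if s.2.2.1 ≥ 1 then s.2.2.2.2 + 1 else s.2.2.2.2))
      (false, 0, 0, 0, 0)
    ((st.2.2.1 + st.2.1 == 0) || (st.2.2.2.1 == 0)) && (st.2.2.2.2 ≤ 1)

-- ===== PORT B =====
-- B's comprehension: nb = [cave[i+di][j+dj] for di, dj in zip(d1is, d1js)]
def gatherCells (cave : List (List String)) (i j : Int) : List (Int × Int) → Option (List String)
  | [] => some []
  | p :: rest =>
    match cellAt cave i j p with
    | none => none
    | some v => (gatherCells cave i j rest).map (fun ns => v :: ns)

def check_alt (cave : List (List String)) (i : Int) (j : Int) : Bool :=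
  match gatherCells cave i j (d1is.zip d1js) with
  | none => false   -- IndexError; excluded by Pre_check
  | some nb =>
    let runs := ((PySem.List.pyRange 0 8 1).map
      (fun k => if PySem.List.pyGetD nb k "" == "." && !(PySem.List.pyGetD nb (k - 1) "" == ".")
                then (1 : Int) else 0)).sum
    runs ≤ 1

-- ===== PRECONDITION & SPEC =====
-- Pre_check excludes exactly the inputs where some neighbour access cave[i+di][j+dj] raises IndexError.
def Pre_check (cave : List (List String)) (i : Int) (j : Int) : Prop :=
  ∀ p ∈ ([((0:Int),(1:Int)),(1,1),(1,0),(1,-1),(0,-1),(-1,-1),(-1,0),(-1,1)] : List (Int × Int)),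
    ((PySem.List.pyGet? cave (i + p.1)).bind (fun row => PySem.List.pyGet? row (j + p.2))).isSome = true
instance (cave : List (List String)) (i : Int) (j : Int) : Decidable (Pre_check cave i j) := by unfold Pre_check; infer_instance

def pvWitness_check : List (List String) × Int × Int :=
  ([[".", ".", "."], [".", "#", "."], [".", ".", "."]], 1, 1)

def Spec_check (cave : List (List String)) (i : Int) (j : Int) (out : Bool) : Prop := out = check_alt cave i j
instance (cave : List (List String)) (i : Int) (j : Int) (out : Bool) : Decidable (Spec_check cave i j out) := by unfold Spec_check; infer_instance

-- ===== CLAIM (what is proved, stated in full; the proofs are below) =====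
def Claim_equal_check : Prop := ∀ (cave : List (List String)) (i : Int) (j : Int), Dom_check cave i j → Pre_check cave i j → Spec_check cave i j (check cave i j)

-- ===== LEMMAS AND PROOFS =====

-- A's state machine over the membership booleans (neighbour == ".")
def stmA (bs : List Bool) : Bool :=
  let st := bs.foldl
    (fun (s : Bool × Int × Int × Int × Int) x =>
      if x then
        if !s.1 then (s.1, s.2.1 + 1, s.2.2.1, s.2.2.2.1, s.2.2.2.2)
        else (s.1, s.2.1, s.2.2.1 + 1, s.2.2.2.1, s.2.2.2.2)
      else
        (true, s.2.1, 0, s.2.2.2.1 + s.2.2.1,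
          if s.2.2.1 ≥ 1 then s.2.2.2.2 + 1 else s.2.2.2.2))
    (false, 0, 0, 0, 0)
  ((st.2.2.1 + st.2.1 == 0) || (st.2.2.2.1 == 0)) && (st.2.2.2.2 ≤ 1)

-- B's run count over the same booleans
def runsB (bs : List Bool) : Bool :=
  (((PySem.List.pyRange 0 8 1).map
    (fun k => if PySem.List.pyGetD bs k false && !(PySem.List.pyGetD bs (k - 1) false)
              then (1 : Int) else 0)).sum ≤ 1 : Bool)

theorem key : ∀ x0 x1 x2 x3 x4 x5 x6 x7 : Bool,
    stmA [x0, x1, x2, x3, x4, x5, x6, x7] = runsB [x0, x1, x2, x3, x4, x5, x6, x7] := by decide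

theorem key8 (bs : List Bool) (h : bs.length = 8) : stmA bs = runsB bs := by
  rcases bs with _ | ⟨x0, _ | ⟨x1, _ | ⟨x2, _ | ⟨x3, _ | ⟨x4, _ | ⟨x5, _ | ⟨x6, _ | ⟨x7, _ | ⟨x8, tl⟩⟩⟩⟩⟩⟩⟩⟩⟩ <;>
    first
      | exact key x0 x1 x2 x3 x4 x5 x6 x7
      | (exfalso; simp only [List.length_cons, List.length_nil] at h; omega)

lemma foldl_none (cave : List (List String)) (i j : Int) (l : List (Int × Int)) :
    l.foldl (fun acc p => acc.bind (fun ns => (cellAt cave i j p).map (fun v => ns ++ [v]))) none = none := by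
  induction l with
  | nil => rfl
  | cons p l ih => simpa using ih

lemma foldl_eq_gather (cave : List (List String)) (i j : Int) (l : List (Int × Int)) :
    ∀ init, l.foldl (fun acc p => acc.bind (fun ns => (cellAt cave i j p).map (fun v => ns ++ [v]))) (some init)
      = (gatherCells cave i j l).map (fun ns => init ++ ns) := by
  induction l with
  | nil => intro init; simp [gatherCells]
  | cons p l ih =>
    intro init
    cases hc : cellAt cave i j p with
    | none => simp [List.foldl_cons, hc, gatherCells, foldl_none]
    | some v =>
      simp only [List.foldl_cons, hc, Option.bind_some, Option.map_some, gatherCells, ih]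
      cases gatherCells cave i j l <;> simp

lemma gather_some (cave : List (List String)) (i j : Int) (l : List (Int × Int))
    (h : ∀ p ∈ l, (cellAt cave i j p).isSome = true) :
    ∃ ns, gatherCells cave i j l = some ns ∧ ns.length = l.length := by
  induction l with
  | nil => exact ⟨[], rfl, rfl⟩
  | cons p l ih =>
    obtain ⟨v, hv⟩ := Option.isSome_iff_exists.mp (h p (by simp))
    obtain ⟨ns, hns, hlen⟩ := ih (fun q hq => h q (by simp [hq]))
    exact ⟨v :: ns, by simp [gatherCells, hv, hns], by simp [hlen]⟩

theorem check_spec_aux (cave : List (List String)) (i j : Int) (hpre : Pre_check cave i j) :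
    check cave i j = check_alt cave i j := by
  have hall : ∀ p ∈ d1is.zip d1js, (cellAt cave i j p).isSome = true := by
    intro p hp
    exact hpre p (by simpa [d1is, d1js, cellAt] using hp)
  obtain ⟨ns, hns, hlen⟩ := gather_some cave i j _ hall
  have hlen8 : ns.length = 8 := by simpa [d1is, d1js] using hlen
  have hA : checkNeighbours cave i j = some ns := by
    simp [checkNeighbours, foldl_eq_gather, hns]
  simp only [check, check_alt, hA, hns]
  have h1 : (ns.foldl
      (fun (s : Bool × Int × Int × Int × Int) neighbour =>
        if neighbour == "." then
          if !s.1 then (s.1, s.2.1 + 1, s.2.2.1, s.2.2.2.1, s.2.2.2.2)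
          else (s.1, s.2.1, s.2.2.1 + 1, s.2.2.2.1, s.2.2.2.2)
        else
          (true, s.2.1, 0, s.2.2.2.1 + s.2.2.1,
            if s.2.2.1 ≥ 1 then s.2.2.2.2 + 1 else s.2.2.2.2))
      (false, 0, 0, 0, 0))
      = (ns.map (fun s => s == ".")).foldl
      (fun (s : Bool × Int × Int × Int × Int) x =>
        if x then
          if !s.1 then (s.1, s.2.1 + 1, s.2.2.1, s.2.2.2.1, s.2.2.2.2)
          else (s.1, s.2.1, s.2.2.1 + 1, s.2.2.2.1, s.2.2.2.2)
        else
          (true, s.2.1, 0, s.2.2.2.1 + s.2.2.1,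
            if s.2.2.1 ≥ 1 then s.2.2.2.2 + 1 else s.2.2.2.2))
      (false, 0, 0, 0, 0) := by
    simp only [List.foldl_map]
  have h2 : (((PySem.List.pyRange 0 8 1).map
      (fun k => if PySem.List.pyGetD ns k "" == "." && !(PySem.List.pyGetD ns (k - 1) "" == ".")
                then (1 : Int) else 0)).sum ≤ 1 : Bool)
      = runsB (ns.map (fun s => s == ".")) := by
    simp only [runsB]
    rw [show (false : Bool) = (("" : String) == ".") from rfl]
    simp only [PySem.List.pyGetD_map]
  rw [h1, h2]
  exact key8 _ (by simp [hlen8])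

-- ===== VERDICT (by name: the statement is the Claim_ definition above) =====
theorem check_spec : Claim_equal_check := by
  intro cave i j _ hpre
  exact check_spec_aux cave i j hpre
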